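-- pv_equiv track=rewrite | github.com/acumos/acumos-python-client | acumos/protogen.py | _gen_enum
-- ===== SOURCE A (Python) =====
-- _enum_template = '''
-- enum {name} {{
-- {enum_def}
-- }}'''
--
-- def _gen_enum(enums, name, values=None):
--     '''Produces an enum protobuf definition. An UNKNOWN enum is added if values are provided without a 0'''
--     if values is not None:
--         if 0 not in values:
--             enums = ('UNKNOWN', ) + tuple(enums)
--             values = (0, ) + tuple(values)
--
--         enums, values = zip(*sorted(zip(enums, values), key=lambda x: x[1]))
--
--         # the first enum value must be zero in proto3
--         zidx = values.index(0)
--         enums = enums[zidx:] + enums[:zidx]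
--         values = values[zidx:] + values[:zidx]
--     else:
--         values = range(len(enums))
--
--     enum_def = '\n'.join(("  {} = {};".format(name, idx) for name, idx in zip(enums, values)))
--     return _enum_template.format(name=name, enum_def=enum_def)
-- ===== SOURCE B (Python) =====
-- def _gen_enum(enums, name, values=None):
--     '''Produces an enum protobuf definition. An UNKNOWN enum is added if values are provided without a 0'''
--     if values is None:
--         pairs = list(zip(enums, range(len(enums))))
--     else:
--         pairs = list(zip(enums, values))
--         if 0 not in values:
--             pairs.insert(0, ('UNKNOWN', 0))
--         # proto3 needs the 0-valued enum first: non-negatives ascending, then negatives ascending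
--         neg = sorted((p for p in pairs if p[1] < 0), key=lambda p: p[1])
--         nonneg = sorted((p for p in pairs if p[1] >= 0), key=lambda p: p[1])
--         pairs = nonneg + neg
--     enum_def = '\n'.join('  {} = {};'.format(n, v) for n, v in pairs)
--     return '\nenum {name} {{\n{enum_def}\n}}'.format(name=name, enum_def=enum_def)
-- ===== Notes on version B (the rewrite author's own statement) =====
-- stated objective: alternative
-- what changed: Instead of sorting all (enum, value) pairs by value, scanning for the index of 0 and rotating both tuples with slices, B partitions the zipped pairs by sign and concatenates the sorted non-negatives before the sorted negatives, which yields the same rotated order directly.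
import Mathlib
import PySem

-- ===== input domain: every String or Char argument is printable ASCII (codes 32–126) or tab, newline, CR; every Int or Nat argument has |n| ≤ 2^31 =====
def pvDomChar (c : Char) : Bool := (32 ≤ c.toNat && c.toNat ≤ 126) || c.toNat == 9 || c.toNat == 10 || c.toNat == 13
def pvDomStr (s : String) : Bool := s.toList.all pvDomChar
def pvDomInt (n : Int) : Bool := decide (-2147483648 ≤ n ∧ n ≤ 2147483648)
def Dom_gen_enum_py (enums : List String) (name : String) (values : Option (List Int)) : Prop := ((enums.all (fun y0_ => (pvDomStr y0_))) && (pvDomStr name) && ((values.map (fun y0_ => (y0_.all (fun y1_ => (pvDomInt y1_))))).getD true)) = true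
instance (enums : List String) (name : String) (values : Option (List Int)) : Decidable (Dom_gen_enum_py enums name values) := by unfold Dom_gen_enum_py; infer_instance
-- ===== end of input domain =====

-- B keeps the UNKNOWN/0 guard and the formatting, but replaces A's sort-then-find-0-then-rotate
-- by partitioning the pairs on the sign of the value and sorting each part (objective: alternative).

-- shared formatting helper ('  {} = {};' lines joined by '\n', wrapped in the enum template);
-- both Pythons share this join/format code verbatim
def pvLine (n : String) (v : Int) : List Char :=
  ("  ".toList ++ n.toList) ++ (" = ".toList ++ (PySem.Int.toChars v ++ ";".toList))

def pvRender (name : String) (pairs : List (String × Int)) : String :=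
  String.ofList ("\nenum ".toList ++ name.toList ++ " {\n".toList ++
    PySem.Chars.join "\n".toList (pairs.map (fun p => pvLine p.1 p.2)) ++ "\n}".toList)

-- ===== PORT A =====
def gen_enum_py (enums : List String) (name : String) (values : Option (List Int)) : String :=
  match values with
  | none => pvRender name (List.zip enums (PySem.List.pyRange 0 (PySem.List.len enums) 1))
  | some vs0 =>
      let ev := if (0:Int) ∈ vs0 then (enums, vs0) else ("UNKNOWN" :: enums, (0:Int) :: vs0)
      let pairs := PySem.List.sorted (List.zip ev.1 ev.2) (fun p => p.2) false
      let es' := pairs.map Prod.fst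
      let vs' := pairs.map Prod.snd
      -- Python raises ValueError when 0 ∉ vs' (also covers the empty-zip unpack error); excluded by Pre_
      let zidx : Nat := (PySem.List.index? vs' (0:Int)).getD 0
      let es'' := PySem.List.slice es' (some (zidx : Int)) none ++ PySem.List.slice es' none (some (zidx : Int))
      let vs'' := PySem.List.slice vs' (some (zidx : Int)) none ++ PySem.List.slice vs' none (some (zidx : Int))
      pvRender name (List.zip es'' vs'')

-- ===== PORT B =====
def gen_enum_py_alt (enums : List String) (name : String) (values : Option (List Int)) : String :=
  match values with
  | none => pvRender name (List.zip enums (PySem.List.pyRange 0 (PySem.List.len enums) 1))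
  | some vs =>
      let pairs0 := List.zip enums vs
      let pairs1 := if (0:Int) ∈ vs then pairs0 else ("UNKNOWN", (0:Int)) :: pairs0
      let neg := PySem.List.sorted (pairs1.filter (fun p => decide (p.2 < 0))) (fun p => p.2) false
      let nonneg := PySem.List.sorted (pairs1.filter (fun p => decide (0 ≤ p.2))) (fun p => p.2) false
      pvRender name (nonneg ++ neg)

-- ===== PRECONDITION & SPEC =====
-- Pre_ excludes exactly the inputs where A raises ValueError: values given containing a 0
-- that is lost when zip truncates to len(enums) (then A's values.index(0) / tuple unpack fails).
def Pre_gen_enum_py (enums : List String) (name : String) (values : Option (List Int)) : Prop :=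
  (match values with
   | none => true
   | some vs => !(vs.contains 0) || ((List.zip enums vs).map Prod.snd).contains 0) = true
instance (enums : List String) (name : String) (values : Option (List Int)) : Decidable (Pre_gen_enum_py enums name values) := by unfold Pre_gen_enum_py; infer_instance

def pvWitness_gen_enum_py : List String × String × Option (List Int) := (["A", "B"], "E", some [1, 0])

def Spec_gen_enum_py (enums : List String) (name : String) (values : Option (List Int)) (out : String) : Prop := out = gen_enum_py_alt enums name values
instance (enums : List String) (name : String) (values : Option (List Int)) (out : String) : Decidable (Spec_gen_enum_py enums name values out) := by unfold Spec_gen_enum_py; infer_instance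

-- ===== CLAIM (what is proved, stated in full; the proofs are below) =====
def Claim_equal_gen_enum_py : Prop := ∀ (enums : List String) (name : String) (values : Option (List Int)), Dom_gen_enum_py enums name values → Pre_gen_enum_py enums name values → Spec_gen_enum_py enums name values (gen_enum_py enums name values)

-- ===== LEMMAS AND PROOFS =====

-- inserting x lands strictly before everything it is 'before'
lemma pvInsertBy_append_right (x : String × Int) (l₁ l₂ : List (String × Int))
    (h : ∀ y ∈ l₂, decide (x.2 < y.2) = true) :
    PySem.List.insertBy (fun a b => decide (a.2 < b.2)) x (l₁ ++ l₂)
      = PySem.List.insertBy (fun a b => decide (a.2 < b.2)) x l₁ ++ l₂ := by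
  induction l₁ with
  | nil =>
      cases l₂ with
      | nil => rfl
      | cons y t => simp [PySem.List.insertBy, h y (by simp)]
  | cons z l₁ ih =>
      by_cases hz : x.2 < z.2 <;> simp [PySem.List.insertBy, hz, ih]

lemma pvInsertBy_append_left (x : String × Int) (l₁ l₂ : List (String × Int))
    (h : ∀ y ∈ l₁, decide (x.2 < y.2) = false) :
    PySem.List.insertBy (fun a b => decide (a.2 < b.2)) x (l₁ ++ l₂)
      = l₁ ++ PySem.List.insertBy (fun a b => decide (a.2 < b.2)) x l₂ := by
  induction l₁ with
  | nil => rfl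
  | cons z l₁ ih =>
      have hz : decide (x.2 < z.2) = false := h z (by simp)
      simp only [List.cons_append, PySem.List.insertBy, hz]
      simp only [Bool.false_eq_true, if_false, List.cons.injEq, true_and]
      exact ih (fun y hy => h y (by simp [hy]))

lemma pvSorted_append_singleton (xs : List (String × Int)) (x : String × Int) :
    PySem.List.sorted (xs ++ [x]) (fun p => p.2) false
      = PySem.List.insertBy (fun a b => decide (a.2 < b.2)) x
          (PySem.List.sorted xs (fun p => p.2) false) := by
  rw [PySem.List.sorted_eq_foldl_insertBy, PySem.List.sorted_eq_foldl_insertBy, List.foldl_append]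
  rfl

-- a stable ascending sort splits at 0: negatives first, then non-negatives
lemma pvSorted_split (xs : List (String × Int)) :
    PySem.List.sorted xs (fun p => p.2) false
      = PySem.List.sorted (xs.filter (fun p => decide (p.2 < 0))) (fun p => p.2) false
        ++ PySem.List.sorted (xs.filter (fun p => decide (0 ≤ p.2))) (fun p => p.2) false := by
  induction xs using List.reverseRecOn with
  | nil => rfl
  | append_singleton xs x ih =>
      by_cases hx : x.2 < 0
      · have hf1 : (xs ++ [x]).filter (fun p => decide (p.2 < 0))
            = xs.filter (fun p => decide (p.2 < 0)) ++ [x] := by simp [List.filter_append, hx]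
        have hf2 : (xs ++ [x]).filter (fun p => decide (0 ≤ p.2))
            = xs.filter (fun p => decide (0 ≤ p.2)) := by simp [List.filter_append, not_le.mpr hx]
        rw [pvSorted_append_singleton, ih, hf1, hf2, pvSorted_append_singleton,
          pvInsertBy_append_right]
        intro y hy
        have : y ∈ xs.filter (fun p => decide (0 ≤ p.2)) := (PySem.List.mem_sorted _ _ _ _).mp hy
        have h0 : (0:Int) ≤ y.2 := by simpa using (List.mem_filter.mp this).2
        simpa using lt_of_lt_of_le hx h0
      · have hx' : (0:Int) ≤ x.2 := not_lt.mp hx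
        have hf1 : (xs ++ [x]).filter (fun p => decide (p.2 < 0))
            = xs.filter (fun p => decide (p.2 < 0)) := by simp [List.filter_append, hx]
        have hf2 : (xs ++ [x]).filter (fun p => decide (0 ≤ p.2))
            = xs.filter (fun p => decide (0 ≤ p.2)) ++ [x] := by simp [List.filter_append, hx']
        rw [pvSorted_append_singleton, ih, hf1, hf2, pvSorted_append_singleton,
          pvInsertBy_append_left]
        intro y hy
        have : y ∈ xs.filter (fun p => decide (p.2 < 0)) := (PySem.List.mem_sorted _ _ _ _).mp hy
        have h0 : y.2 < 0 := by simpa using (List.mem_filter.mp this).2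
        simpa using not_lt.mpr (le_of_lt (lt_of_lt_of_le h0 hx'))

lemma pvIndex?_append_shift (v : Int) (l t : List Int) (h : v ∉ l) :
    PySem.List.index? (l ++ t) v = (PySem.List.index? t v).map (· + l.length) := by
  induction l with
  | nil => simp only [List.nil_append]; cases PySem.List.index? t v <;> rfl
  | cons x l ih =>
      have hx : x ≠ v := by rintro rfl; exact h (by simp)
      rw [List.cons_append, PySem.List.index?_cons_of_ne _ hx,
        ih (fun hv => h (by simp [hv]))]
      cases PySem.List.index? t v
      · simp
      · simp; omega

-- the sorted non-negative block starts with the (present) value 0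
lemma pvIndex?_nonneg_zero (xs : List (String × Int))
    (h0 : (0:Int) ∈ (xs.filter (fun p => decide (0 ≤ p.2))).map Prod.snd) :
    PySem.List.index?
      ((PySem.List.sorted (xs.filter (fun p => decide (0 ≤ p.2))) (fun p => p.2) false).map Prod.snd)
      (0:Int) = some 0 := by
  set f := xs.filter (fun p => decide (0 ≤ p.2)) with hf
  obtain ⟨p, hp, hp2⟩ := List.mem_map.mp h0
  have hne : PySem.List.sorted f (fun p => p.2) false ≠ [] := by
    intro hnil
    have : p ∈ PySem.List.sorted f (fun p => p.2) false := (PySem.List.mem_sorted _ _ _ _).mpr hp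
    simp [hnil] at this
  obtain ⟨q, t, hqt⟩ := List.exists_cons_of_ne_nil hne
  have hq2 : q.2 = 0 := by
    have hle : q.2 ≤ p.2 := PySem.List.key_head_sorted_le _ _ hqt p hp
    have hqmem : q ∈ f := (PySem.List.mem_sorted _ _ _ _).mp
      (by rw [hqt]; exact List.mem_cons_self ..)
    have hq0 : (0:Int) ≤ q.2 := by simpa using (List.mem_filter.mp hqmem).2
    omega
  rw [hqt]
  simp only [List.map_cons, hq2]
  exact PySem.List.index?_cons_self _ _

-- rotating A's sorted list at the first 0 yields B's (non-negatives ++ negatives)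
lemma pvMain (pairs : List (String × Int)) (h0 : (0:Int) ∈ pairs.map Prod.snd) :
    (List.zip
      ((((PySem.List.sorted pairs (fun p => p.2) false).map Prod.fst).drop
          ((PySem.List.index? ((PySem.List.sorted pairs (fun p => p.2) false).map Prod.snd) 0).getD 0))
        ++ (((PySem.List.sorted pairs (fun p => p.2) false).map Prod.fst).take
          ((PySem.List.index? ((PySem.List.sorted pairs (fun p => p.2) false).map Prod.snd) 0).getD 0)))
      ((((PySem.List.sorted pairs (fun p => p.2) false).map Prod.snd).drop
          ((PySem.List.index? ((PySem.List.sorted pairs (fun p => p.2) false).map Prod.snd) 0).getD 0))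
        ++ (((PySem.List.sorted pairs (fun p => p.2) false).map Prod.snd).take
          ((PySem.List.index? ((PySem.List.sorted pairs (fun p => p.2) false).map Prod.snd) 0).getD 0))))
    = PySem.List.sorted (pairs.filter (fun p => decide (0 ≤ p.2))) (fun p => p.2) false
      ++ PySem.List.sorted (pairs.filter (fun p => decide (p.2 < 0))) (fun p => p.2) false := by
  set N := PySem.List.sorted (pairs.filter (fun p => decide (p.2 < 0))) (fun p => p.2) false with hN
  set P := PySem.List.sorted (pairs.filter (fun p => decide (0 ≤ p.2))) (fun p => p.2) false with hP
  have hsplit : PySem.List.sorted pairs (fun p => p.2) false = N ++ P := pvSorted_split pairs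
  have h0f : (0:Int) ∈ (pairs.filter (fun p => decide (0 ≤ p.2))).map Prod.snd := by
    obtain ⟨p, hp, hp2⟩ := List.mem_map.mp h0
    exact List.mem_map.mpr ⟨p, List.mem_filter.mpr ⟨hp, by simp [hp2]⟩, hp2⟩
  have hNmem : (0:Int) ∉ N.map Prod.snd := by
    intro hmem
    obtain ⟨p, hp, hp2⟩ := List.mem_map.mp hmem
    have : p ∈ pairs.filter (fun p => decide (p.2 < 0)) := (PySem.List.mem_sorted _ _ _ _).mp hp
    have : p.2 < 0 := by simpa using (List.mem_filter.mp this).2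
    omega
  have hidx : PySem.List.index? ((PySem.List.sorted pairs (fun p => p.2) false).map Prod.snd) 0
      = some N.length := by
    rw [hsplit, List.map_append, pvIndex?_append_shift _ _ _ hNmem,
      pvIndex?_nonneg_zero pairs h0f]
    simp
  rw [hidx, hsplit]
  simp only [Option.getD_some, List.map_append]
  have hlenf : (N.map Prod.fst).length = N.length := List.length_map ..
  have hlens : (N.map Prod.snd).length = N.length := List.length_map ..
  rw [← hlenf, List.drop_left, List.take_left, hlenf, ← hlens, List.drop_left, List.take_left]
  rw [List.zip_append (by simp), List.zip_map', List.zip_map']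
  simp

-- ===== VERDICT (by name: the statement is the Claim_ definition above) =====
theorem gen_enum_py_spec : Claim_equal_gen_enum_py := by
  intro enums name values _ hpre
  unfold Spec_gen_enum_py
  match values with
  | none => rfl
  | some vs =>
      unfold gen_enum_py gen_enum_py_alt
      simp only []
      by_cases hmem : (0:Int) ∈ vs
      · have h0 : (0:Int) ∈ (List.zip enums vs).map Prod.snd := by
          unfold Pre_gen_enum_py at hpre
          simp only [List.contains_eq_mem, hmem] at hpre
          simpa using hpre
        simp only [if_pos hmem]
        rw [PySem.List.slice_from_natCast, PySem.List.slice_to_natCast,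
          PySem.List.slice_from_natCast, PySem.List.slice_to_natCast]
        rw [pvMain (List.zip enums vs) h0]
      · have hzip : List.zip ("UNKNOWN" :: enums) ((0:Int) :: vs)
            = ("UNKNOWN", (0:Int)) :: List.zip enums vs := rfl
        have h0 : (0:Int) ∈ (("UNKNOWN", (0:Int)) :: List.zip enums vs).map Prod.snd := by simp
        simp only [if_neg hmem, hzip]
        rw [PySem.List.slice_from_natCast, PySem.List.slice_to_natCast,
          PySem.List.slice_from_natCast, PySem.List.slice_to_natCast]
        rw [pvMain _ h0]
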